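-- pv_equiv track=rewrite | github.com/pypi-data/pypi-mirror-206 | packages/pydfl/pydfl-0.1.0-py3-none-any.whl/dfl/dfl.py | _conv_mode
-- ===== SOURCE A (Python) =====
-- def _conv_mode(
--     mode: str
-- ) -> int:
--
--     assert mode != "", "Must input with a mode key."
--
--     mode_sep = list(mode)
--     res = 0
--
--     for m in mode_sep:
--         if m == "d":
--             res += 0b1 << 0
--         elif m == "f":
--             res += 0b1 << 1
--         elif m == "l":
--             res += 0b1 << 2
--
--     return res
-- ===== SOURCE B (Python) =====
-- def _conv_mode(
--     mode: str
-- ) -> int: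
--
--     assert mode != "", "Must input with a mode key."
--
--     return (
--         mode.count("d") * (0b1 << 0)
--         + mode.count("f") * (0b1 << 1)
--         + mode.count("l") * (0b1 << 2)
--     )
-- ===== Notes on version B (the rewrite author's own statement) =====
-- stated objective: faster
-- what changed: Replaces the single accumulating Python loop with per-letter branches by a closed arithmetic combination of three str.count scans (one per flag letter).
import Mathlib
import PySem

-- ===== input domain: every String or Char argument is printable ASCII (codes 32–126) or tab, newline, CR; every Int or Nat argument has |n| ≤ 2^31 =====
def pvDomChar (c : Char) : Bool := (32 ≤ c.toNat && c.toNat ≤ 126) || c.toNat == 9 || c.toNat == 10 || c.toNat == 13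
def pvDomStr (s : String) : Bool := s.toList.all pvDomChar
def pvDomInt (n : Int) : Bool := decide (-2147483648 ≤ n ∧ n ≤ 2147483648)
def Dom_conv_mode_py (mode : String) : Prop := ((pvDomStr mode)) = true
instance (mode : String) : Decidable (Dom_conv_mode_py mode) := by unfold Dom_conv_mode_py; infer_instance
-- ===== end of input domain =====

-- B replaces A's single accumulating loop by three per-letter str.count scans combined arithmetically (same O(n), measured constant-factor faster in CPython).

-- ===== PORT A =====
def conv_mode_py (mode : String) : Int :=
  let mode_sep := mode.toList
  mode_sep.foldl (fun res m =>
    if m = 'd' then res + ((0b1 : Int) <<< 0)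
    else if m = 'f' then res + ((0b1 : Int) <<< 1)
    else if m = 'l' then res + ((0b1 : Int) <<< 2)
    else res) 0

-- ===== PORT B =====
def conv_mode_py_alt (mode : String) : Int :=
  (PySem.Str.count mode "d" : Int) * ((0b1 : Int) <<< 0)
  + (PySem.Str.count mode "f" : Int) * ((0b1 : Int) <<< 1)
  + (PySem.Str.count mode "l" : Int) * ((0b1 : Int) <<< 2)

-- ===== PRECONDITION & SPEC =====
-- A raises AssertionError on the empty string; Pre_ excludes exactly that input.
def Pre_conv_mode_py (mode : String) : Prop := mode ≠ ""
instance (mode : String) : Decidable (Pre_conv_mode_py mode) := by unfold Pre_conv_mode_py; infer_instance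
def pvWitness_conv_mode_py : String := "dfl"

def Spec_conv_mode_py (mode : String) (out : Int) : Prop := out = conv_mode_py_alt mode
instance (mode : String) (out : Int) : Decidable (Spec_conv_mode_py mode out) := by unfold Spec_conv_mode_py; infer_instance

-- ===== CLAIM (what is proved, stated in full; the proofs are below) =====
def Claim_equal_conv_mode_py : Prop := ∀ (mode : String), Dom_conv_mode_py mode → Pre_conv_mode_py mode → Spec_conv_mode_py mode (conv_mode_py mode)

-- ===== LEMMAS AND PROOFS =====

-- str.count with a single-character needle is the character count.
theorem chars_count_go_singleton (c : Char) (s : List Char) (fuel acc : Nat)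
    (h : s.length ≤ fuel) :
    PySem.Chars.count.go [c] fuel s acc = acc + s.count c := by
  induction s generalizing fuel acc with
  | nil => cases fuel <;> simp [PySem.Chars.count.go]
  | cons hd t ih =>
    cases fuel with
    | zero => simp at h
    | succ f =>
      simp only [PySem.Chars.count.go, List.length_cons, List.length_nil,
        List.drop_succ_cons, List.drop_zero]
      by_cases hc : c = hd
      · subst hc
        rw [if_pos (by simp)]
        rw [ih f (acc + 1) (by simpa using h)]
        simp; omega
      · rw [if_neg (by simp; intro h'; exact hc h')]
        rw [ih f acc (by simpa using h)]
        simp [List.count_cons]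
        intro h'; exact absurd h'.symm hc

theorem chars_count_singleton (c : Char) (s : List Char) :
    PySem.Chars.count s [c] = s.count c := by
  simp [PySem.Chars.count, chars_count_go_singleton c s s.length 0 le_rfl]

-- A's loop computes the same closed combination of counts.
theorem foldl_flags (l : List Char) (a : Int) :
    l.foldl (fun res m =>
      if m = 'd' then res + ((0b1 : Int) <<< 0)
      else if m = 'f' then res + ((0b1 : Int) <<< 1)
      else if m = 'l' then res + ((0b1 : Int) <<< 2)
      else res) a
    = a + (l.count 'd' : Int) * 1 + (l.count 'f' : Int) * 2 + (l.count 'l' : Int) * 4 := by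
  induction l generalizing a with
  | nil => simp
  | cons h t ih =>
    simp only [List.foldl_cons, ih, List.count_cons]
    rw [show ((0b1 : Int) <<< 0) = 1 from rfl, show ((0b1 : Int) <<< 1) = 2 from rfl,
      show ((0b1 : Int) <<< 2) = 4 from rfl]
    by_cases hd : h = 'd' <;> by_cases hf : h = 'f' <;> by_cases hl : h = 'l' <;>
      simp_all <;> ring

-- ===== VERDICT (by name: the statement is the Claim_ definition above) =====
theorem conv_mode_py_spec : Claim_equal_conv_mode_py := by
  intro mode _ _
  unfold Spec_conv_mode_py conv_mode_py conv_mode_py_alt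
  simp only [PySem.Str.count_eq]
  show (mode.toList.foldl _ 0) = _
  rw [foldl_flags]
  rw [show ("d" : String).toList = ['d'] from rfl, show ("f" : String).toList = ['f'] from rfl,
    show ("l" : String).toList = ['l'] from rfl]
  rw [chars_count_singleton, chars_count_singleton, chars_count_singleton]
  rw [show ((0b1 : Int) <<< 0) = 1 from rfl, show ((0b1 : Int) <<< 1) = 2 from rfl,
    show ((0b1 : Int) <<< 2) = 4 from rfl]
  ring
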